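-- pv_equiv track=rewrite | github.com/HGodal/Knowit_Julekalender | Jul 2021/dag14/dag14.py | is_troll
-- ===== SOURCE A (Python) =====
-- from itertools import permutations as pms
--
-- def all_pairs(lst):
--     for p in pms(lst):
--         i = iter(p)
--         yield tuple(zip(i, i))
--
-- def is_troll(inds):
--     if not len(inds) == 4:
--         return False
--
--     if len(inds[3]) < 2:
--         return False
--
--     for t in inds[0]:
--         for r in inds[1]:
--             for o in inds[2]:
--                 for ll in all_pairs(inds[3]):
--                     valid = True
--                     combo = [t, r, o, ll[0][0], ll[0][1]]
--                     for i in range(len(combo)-1):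
--                         diff = combo[i+1] - combo[i]
--                         if diff <= 1 or diff > 6:
--                             valid = False
--                     if valid:
--                         return True
--     return False
-- ===== SOURCE B (Python) =====
-- def is_troll(inds):
--     # DP over the chain: propagate the set of viable values stage by stage
--     # instead of enumerating permutations of inds[3].
--     if len(inds) != 4 or len(inds[3]) < 2:
--         return False
--
--     def ok(u, v):
--         return 1 < v - u <= 6
--
--     a, b, c, last = inds
--     en = list(enumerate(last))
--     s4 = [x for i, x in en if any(j != i and ok(x, y) for j, y in en)]
--     s3 = [o for o in c if any(ok(o, x) for x in s4)]
--     s2 = [r for r in b if any(ok(r, o) for o in s3)]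
--     return any(any(ok(t, r) for r in s2) for t in a)
-- ===== Notes on version B (the rewrite author's own statement) =====
-- stated objective: alternative
-- what changed: B replaces A's enumeration of every permutation of inds[3] (only the first two elements of which A ever inspects) by a stage-wise filtering DP over the chain t->r->o->x->y, testing ordered index pairs of inds[3] via enumerate.
import Mathlib
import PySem

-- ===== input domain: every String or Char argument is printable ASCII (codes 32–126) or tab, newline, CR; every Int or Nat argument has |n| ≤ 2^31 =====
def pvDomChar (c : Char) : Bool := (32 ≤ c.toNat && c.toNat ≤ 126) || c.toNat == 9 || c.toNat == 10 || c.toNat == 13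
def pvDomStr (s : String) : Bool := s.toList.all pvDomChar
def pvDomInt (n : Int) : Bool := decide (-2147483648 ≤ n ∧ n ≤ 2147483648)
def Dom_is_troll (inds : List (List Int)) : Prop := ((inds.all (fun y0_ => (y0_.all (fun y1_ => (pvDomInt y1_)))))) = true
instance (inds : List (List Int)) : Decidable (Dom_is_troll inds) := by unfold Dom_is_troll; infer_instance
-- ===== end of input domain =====

-- B replaces A's enumeration of all permutations of inds[3] by a stage-wise
-- filter (DP over the chain), keeping the exact same Boolean result.
-- ===== PORT A =====
-- chunk a permutation into consecutive pairs (Python: tuple(zip(i, i)) on one iterator)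
def pvChunkPairs : List Int → List (Int × Int)
  | x :: y :: rest => (x, y) :: pvChunkPairs rest
  | _ => []

-- all_pairs(lst): for each permutation of lst, the list of consecutive pairs
def pvAllPairs (lst : List Int) : List (List (Int × Int)) :=
  (PySem.List.permutations lst lst.length).map pvChunkPairs

def is_troll (inds : List (List Int)) : Bool :=
  if !(inds.length == 4) then false
  else if (inds.getD 3 []).length < 2 then false
  else
    (inds.getD 0 []).any fun t =>
      (inds.getD 1 []).any fun r =>
        (inds.getD 2 []).any fun o =>
          (pvAllPairs (inds.getD 3 [])).any fun ll =>
            match ll with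
            | (x, y) :: _ =>
              let combo := [t, r, o, x, y]
              (List.range (combo.length - 1)).all fun i =>
                let diff := combo.getD (i + 1) 0 - combo.getD i 0
                !(decide (diff ≤ 1) || decide (diff > 6))
            | [] => false    -- unreachable: under the guard every permutation has ≥ 2 elements

-- ===== PORT B =====
def pvOk (u v : Int) : Bool := decide (1 < v - u) && decide (v - u ≤ 6)

def is_troll_alt (inds : List (List Int)) : Bool :=
  if inds.length != 4 || (inds.getD 3 []).length < 2 then false
  else
    let a := inds.getD 0 []
    let b := inds.getD 1 []
    let c := inds.getD 2 []
    let last := inds.getD 3 []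
    let en := PySem.List.enumerate last
    let s4 := (en.filter fun p => en.any fun q => q.1 != p.1 && pvOk p.2 q.2).map (·.2)
    let s3 := c.filter fun o => s4.any fun x => pvOk o x
    let s2 := b.filter fun r => s3.any fun o => pvOk r o
    a.any fun t => s2.any fun r => pvOk t r

-- ===== PRECONDITION & SPEC =====
def Spec_is_troll (inds : List (List Int)) (out : Bool) : Prop := out = is_troll_alt inds
instance (inds : List (List Int)) (out : Bool) : Decidable (Spec_is_troll inds out) := by unfold Spec_is_troll; infer_instance

-- ===== CLAIM (what is proved, stated in full; the proofs are below) =====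
def Claim_equal_is_troll : Prop := ∀ (inds : List (List Int)), Dom_is_troll inds → Spec_is_troll inds (is_troll inds)

-- ===== LEMMAS AND PROOFS =====

lemma perms_succ {α : Type} (xs : List α) (r : Nat) :
    PySem.List.permutations xs (r+1) =
      (List.range xs.length).flatMap (fun i =>
        match xs[i]? with
        | none => []
        | some x => (PySem.List.permutations (xs.eraseIdx i) r).map (x :: ·)) := rfl

lemma perms_ne_nil {α : Type} : ∀ (r : Nat) (xs : List α), r ≤ xs.length →
    PySem.List.permutations xs r ≠ [] := by
  intro r
  induction r with
  | zero => intro xs _; simp [PySem.List.permutations]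
  | succ n ih =>
    intro xs h
    rw [perms_succ]
    intro hnil
    rw [List.flatMap_eq_nil_iff] at hnil
    have h0 : 0 ∈ List.range xs.length := by simp; omega
    have := hnil 0 h0
    have hx : xs[0]? = some (xs[0]'(by omega)) := List.getElem?_eq_getElem (by omega)
    rw [hx] at this
    simp at this
    exact ih xs.tail (by simp; omega) this


def pvHd1 (Q : Int → Bool) : List Int → Bool
  | y :: _ => Q y
  | [] => false

def pvHd2 (Q : Int → Int → Bool) : List Int → Bool
  | x :: y :: _ => Q x y
  | _ => false

lemma pvHd2_cons (Q : Int → Int → Bool) (x : Int) (q : List Int) :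
    pvHd2 Q (x :: q) = pvHd1 (Q x) q := by cases q <;> rfl

lemma exists_perms_one (Q : Int → Bool) :
    ∀ (r : Nat) (xs : List Int), r + 1 ≤ xs.length →
    ((∃ q ∈ PySem.List.permutations xs (r+1), pvHd1 Q q = true) ↔
      ∃ j : Nat, ∃ _ : j < xs.length, Q xs[j] = true) := by
  intro r xs h
  rw [perms_succ]
  constructor
  · rintro ⟨q, hq, hQ⟩
    rw [List.mem_flatMap] at hq
    obtain ⟨i, hi, hqi⟩ := hq
    rw [List.mem_range] at hi
    rw [List.getElem?_eq_getElem hi] at hqi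
    simp only [List.mem_map] at hqi
    obtain ⟨q', _, rfl⟩ := hqi
    exact ⟨i, hi, hQ⟩
  · rintro ⟨j, hj, hQ⟩
    obtain ⟨q', hq'⟩ := List.exists_mem_of_ne_nil _
      (perms_ne_nil r (xs.eraseIdx j) (by rw [List.length_eraseIdx_of_lt hj]; omega))
    refine ⟨xs[j] :: q', ?_, hQ⟩
    rw [List.mem_flatMap]
    refine ⟨j, List.mem_range.mpr hj, ?_⟩
    rw [List.getElem?_eq_getElem hj]
    exact List.mem_map.mpr ⟨q', hq', rfl⟩

lemma exists_perms_two' (Q : Int → Int → Bool) (m : Nat) (xs : List Int) (hm : xs.length = m + 2) :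
    ((∃ p ∈ PySem.List.permutations xs (m + 1 + 1), pvHd2 Q p = true) ↔
      ∃ i : Nat, ∃ _ : i < xs.length, ∃ j : Nat, ∃ _ : j < xs.length, j ≠ i ∧ Q xs[i] xs[j] = true) := by
  rw [perms_succ]
  constructor
  · rintro ⟨p, hp, hP⟩
    rw [List.mem_flatMap] at hp
    obtain ⟨i, hi, hpi⟩ := hp
    rw [List.mem_range] at hi
    rw [List.getElem?_eq_getElem hi] at hpi
    obtain ⟨q, hq, rfl⟩ := List.mem_map.mp hpi
    rw [pvHd2_cons] at hP
    have h1 : m + 1 ≤ (xs.eraseIdx i).length := by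
      rw [List.length_eraseIdx_of_lt hi]; omega
    obtain ⟨j', hj', hQ⟩ := (exists_perms_one (Q xs[i]) m (xs.eraseIdx i) h1).mp ⟨q, hq, hP⟩
    rw [List.getElem_eraseIdx] at hQ
    by_cases hlt : j' < i
    · refine ⟨i, hi, j', by omega, by omega, ?_⟩
      simpa [hlt] using hQ
    · have hj'1 : j' + 1 < xs.length := by
        rw [List.length_eraseIdx_of_lt hi] at hj'; omega
      refine ⟨i, hi, j' + 1, hj'1, by omega, ?_⟩
      simpa [hlt] using hQ
  · rintro ⟨i, hi, j, hj, hne, hQ⟩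
    have h1 : m + 1 ≤ (xs.eraseIdx i).length := by
      rw [List.length_eraseIdx_of_lt hi]; omega
    have hj' : (if j < i then j else j - 1) < (xs.eraseIdx i).length := by
      rw [List.length_eraseIdx_of_lt hi]; split <;> omega
    have hval : (xs.eraseIdx i)[if j < i then j else j - 1]'hj' = xs[j] := by
      by_cases hlt : j < i
      · have : (xs.eraseIdx i)[j]'(by simpa [if_pos hlt] using hj') = xs[j] := by
          rw [List.getElem_eraseIdx]
          rw [dif_pos hlt]
        simpa [if_pos hlt] using this
      · have hne1 : ¬ (j - 1 < i) := by omega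
        have : (xs.eraseIdx i)[j - 1]'(by simpa [if_neg hlt] using hj') = xs[j] := by
          rw [List.getElem_eraseIdx]
          rw [dif_neg hne1]
          congr 1
          omega
        simpa [if_neg hlt] using this
    obtain ⟨q, hq, hmq⟩ := (exists_perms_one (Q xs[i]) m (xs.eraseIdx i) h1).mpr
      ⟨_, hj', by rw [hval]; exact hQ⟩
    refine ⟨xs[i] :: q, ?_, ?_⟩
    · rw [List.mem_flatMap]
      refine ⟨i, List.mem_range.mpr hi, ?_⟩
      rw [List.getElem?_eq_getElem hi]
      exact List.mem_map.mpr ⟨q, hq, rfl⟩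
    · rw [pvHd2_cons]
      exact hmq

lemma exists_perms_two (Q : Int → Int → Bool) (xs : List Int) (h2 : 2 ≤ xs.length) :
    ((PySem.List.permutations xs xs.length).any (pvHd2 Q)) = true ↔
      ∃ i : Nat, ∃ _ : i < xs.length, ∃ j : Nat, ∃ _ : j < xs.length, j ≠ i ∧ Q xs[i] xs[j] = true := by
  obtain ⟨m, hm⟩ : ∃ m, xs.length = m + 2 := ⟨xs.length - 2, by omega⟩
  rw [List.any_eq_true]
  have hrw : PySem.List.permutations xs xs.length = PySem.List.permutations xs (m + 1 + 1) := by
    rw [hm]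
  rw [hrw]
  exact exists_perms_two' Q m xs hm

lemma chunk_match_eq_pvHd2 (C : Int → Int → Bool) (p : List Int) :
    (match pvChunkPairs p with
      | (x, y) :: _ => C x y
      | [] => false) = pvHd2 C p := by
  match p with
  | [] => rfl
  | [x] => rfl
  | x :: y :: rest => rfl

lemma body_eq' (t r o x y : Int) :
    ((List.range ([t, r, o, x, y].length - 1)).all fun i =>
        !(decide ([t, r, o, x, y].getD (i + 1) 0 - [t, r, o, x, y].getD i 0 ≤ 1) ||
          decide ([t, r, o, x, y].getD (i + 1) 0 - [t, r, o, x, y].getD i 0 > 6)))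
      = (pvOk t r && pvOk r o && pvOk o x && pvOk x y) := by
  rw [Bool.eq_iff_iff]
  simp [List.range_succ, pvOk]
  omega

lemma pred_eq_pvHd2 (t r o : Int) :
    ((fun ll => match ll with
      | (x, y) :: _ =>
        (List.range ([t, r, o, x, y].length - 1)).all fun i =>
          !(decide ([t, r, o, x, y].getD (i + 1) 0 - [t, r, o, x, y].getD i 0 ≤ 1) ||
            decide ([t, r, o, x, y].getD (i + 1) 0 - [t, r, o, x, y].getD i 0 > 6))
      | [] => false) ∘ pvChunkPairs)
    = pvHd2 (fun x y => pvOk t r && pvOk r o && pvOk o x && pvOk x y) := by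
  funext p
  rw [Function.comp_apply, chunk_match_eq_pvHd2]
  cases p with
  | nil => rfl
  | cons x q =>
    cases q with
    | nil => rfl
    | cons y q' => simp only [pvHd2, body_eq']

lemma inner_iff (d : List Int) (hd : 2 ≤ d.length) (t r o : Int) :
    (∃ ll ∈ pvAllPairs d,
      (match ll with
        | (x, y) :: _ =>
          (List.range ([t, r, o, x, y].length - 1)).all fun i =>
            !(decide ([t, r, o, x, y].getD (i + 1) 0 - [t, r, o, x, y].getD i 0 ≤ 1) ||
              decide ([t, r, o, x, y].getD (i + 1) 0 - [t, r, o, x, y].getD i 0 > 6))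
        | [] => false) = true)
    ↔ ∃ i : Nat, ∃ _ : i < d.length, ∃ j : Nat, ∃ _ : j < d.length, j ≠ i ∧
        (pvOk t r && pvOk r o && pvOk o d[i] && pvOk d[i] d[j]) = true := by
  rw [← List.any_eq_true]
  unfold pvAllPairs
  rw [List.any_map, pred_eq_pvHd2]
  exact exists_perms_two _ _ hd

lemma main_eq (a b c d : List Int) (hd : 2 ≤ d.length) :
    (a.any fun t => b.any fun r => c.any fun o =>
      (pvAllPairs d).any fun ll =>
        match ll with
        | (x, y) :: _ =>
          (List.range ([t, r, o, x, y].length - 1)).all fun i =>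
            let diff := [t, r, o, x, y].getD (i + 1) 0 - [t, r, o, x, y].getD i 0
            !(decide (diff ≤ 1) || decide (diff > 6))
        | [] => false)
    = (a.any fun t =>
        (b.filter fun r =>
          (c.filter fun o =>
            (((PySem.List.enumerate d).filter fun p =>
                (PySem.List.enumerate d).any fun q => q.1 != p.1 && pvOk p.2 q.2).map (·.2)).any
              fun x => pvOk o x).any fun o => pvOk r o).any fun r => pvOk t r) := by
  rw [Bool.eq_iff_iff]
  simp only [List.any_eq_true, List.mem_filter, List.mem_map, PySem.List.mem_enumerate_iff,
    zero_add, Bool.and_eq_true, bne_iff_ne, ne_eq]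
  simp only [inner_iff d hd, Bool.and_eq_true]
  constructor
  · rintro ⟨t, ht, r, hr, o, ho, i, hi, j, hj, hne, ⟨⟨h1, h2⟩, h3⟩, h4⟩
    refine ⟨t, ht, r, ⟨hr, o, ⟨ho, d[i], ⟨(↑i, d[i]), ⟨⟨i, hi, rfl⟩,
      (↑j, d[j]), ⟨j, hj, rfl⟩, ?_, h4⟩, rfl⟩, h3⟩, h2⟩, h1⟩
    intro e
    exact hne (Int.natCast_inj.mp e)
  · rintro ⟨t, ht, r, ⟨hr, o, ⟨ho, x, ⟨p, ⟨⟨k, hk, rfl⟩, q, ⟨⟨k', hk', rfl⟩, hne, h4⟩⟩, rfl⟩, h3⟩, h2⟩, h1⟩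
    refine ⟨t, ht, r, hr, o, ho, k, hk, k', hk', ?_, ⟨⟨h1, h2⟩, h3⟩, h4⟩
    intro e
    exact hne (by simp [e])

lemma troll_eq (inds : List (List Int)) : is_troll inds = is_troll_alt inds := by
  unfold is_troll is_troll_alt
  by_cases h4 : inds.length = 4
  · by_cases h2 : (inds.getD 3 []).length < 2
    · have gA : ¬((!(inds.length == 4)) = true) := by simp [h4]
      have gB : (inds.length != 4 || decide ((inds.getD 3 []).length < 2)) = true := by
        simp only [Bool.or_eq_true, decide_eq_true_eq]
        exact Or.inr h2
      rw [if_neg gA, if_pos h2, if_pos gB]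
    · have gA : ¬((!(inds.length == 4)) = true) := by simp [h4]
      have gB : ¬((inds.length != 4 || decide ((inds.getD 3 []).length < 2)) = true) := by
        simp only [Bool.or_eq_true, decide_eq_true_eq, bne_iff_ne, ne_eq]
        push Not
        exact ⟨h4, by omega⟩
      rw [if_neg gA, if_neg h2, if_neg gB]
      exact main_eq _ _ _ _ (by omega)
  · have gA : ((!(inds.length == 4)) = true) := by simp [h4]
    have gB : (inds.length != 4 || decide ((inds.getD 3 []).length < 2)) = true := by
      simp only [Bool.or_eq_true, bne_iff_ne, ne_eq]
      exact Or.inl h4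
    rw [if_pos gA, if_pos gB]

-- ===== VERDICT (by name: the statement is the Claim_ definition above) =====
theorem is_troll_spec : Claim_equal_is_troll := by
  intro inds _
  unfold Spec_is_troll
  exact troll_eq inds
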